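-- pv_equiv track=rewrite | github.com/alexander-g/vkJAX | vkjax/parser.py | group_lines_to_functions
-- ===== SOURCE A (Python) =====
-- import typing as tp
--
-- def group_lines_to_functions(hlo_lines:tp.List[str]) -> tp.Dict[str, tp.List[str]]:
--     functions = dict()
--     while len(hlo_lines):
--         line = hlo_lines.pop(0)
--         if line.endswith('{'):
--             #start of function
--             funcname    = line.split(' ')[0]
--             end_of_func = hlo_lines.index('}')
--             funclines   = hlo_lines[:end_of_func]
--             functions[funcname] = funclines
--     return functions
-- ===== SOURCE B (Python) =====
-- import typing as tp
--
-- def group_lines_to_functions(hlo_lines:tp.List[str]) -> tp.Dict[str, tp.List[str]]: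
--     # One forward pass, no pop(0) and no repeated index() scans: lines opened by a
--     # '...{' line accumulate their body until the next literal '}' line flushes
--     # every pending function at once.  Does not mutate hlo_lines (A empties it).
--     functions = {}
--     pending = []
--     for line in hlo_lines:
--         if line == '}':
--             for name, body in pending:
--                 functions[name] = body
--             pending = []
--         else:
--             for entry in pending:
--                 entry[1].append(line)
--             if line.endswith('{'):
--                 pending.append((line.split(' ')[0], []))
--     return functions
-- ===== Notes on version B (the rewrite author's own statement) =====
-- stated objective: faster
-- what changed: A repeatedly pops the front of the list and rescans the remainder with list.index for every '{'-line; B makes a single forward pass that accumulates bodies of pending open functions and flushes them all at the next '}' line, with no pop(0) and no index() rescans (B also does not mutate hlo_lines, which A empties).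
import Mathlib
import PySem

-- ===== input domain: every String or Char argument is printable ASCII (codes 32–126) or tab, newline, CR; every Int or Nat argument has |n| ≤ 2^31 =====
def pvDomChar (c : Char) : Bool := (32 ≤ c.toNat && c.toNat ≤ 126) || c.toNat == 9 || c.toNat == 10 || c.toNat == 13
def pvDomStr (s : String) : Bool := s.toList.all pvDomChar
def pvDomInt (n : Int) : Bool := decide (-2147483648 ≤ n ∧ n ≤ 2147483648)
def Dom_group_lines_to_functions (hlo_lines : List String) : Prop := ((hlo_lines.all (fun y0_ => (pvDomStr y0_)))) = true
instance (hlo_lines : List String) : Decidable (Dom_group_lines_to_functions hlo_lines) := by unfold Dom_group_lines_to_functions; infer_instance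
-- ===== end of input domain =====

-- B replaces A's pop(0)+index() rescans by one forward pass accumulating pending bodies
-- (return-value equivalence only: Python A empties its argument list, B does not mutate it).

-- ===== PORT A =====
-- the while-pop loop of A; the 'none' branch is where Python's list.index raises ValueError (outside Pre_)
def pyAgroup : List String → PySem.Dict String (List String) → PySem.Dict String (List String)
  | [], fns => fns
  | line :: rest, fns =>
    if PySem.Str.endswith line "{" then
      match PySem.List.index? rest "}" with
      | some e =>
          pyAgroup rest (fns.insert (((PySem.Str.split? line " ").getD []).headD "")
                                    (PySem.List.slice rest (some 0) (some (e : Int))))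
      | none => fns
    else pyAgroup rest fns

def group_lines_to_functions (hlo_lines : List String) : List (String × List String) :=
  (pyAgroup hlo_lines PySem.Dict.empty).items

-- ===== PORT B =====
-- flush: insert every pending (name, body) into the dict, in opening order
def pyBflush (pending : List (String × List String))
    (fns : PySem.Dict String (List String)) : PySem.Dict String (List String) :=
  pending.foldl (fun d nb => d.insert nb.1 nb.2) fns

def pyBgroup : List String → List (String × List String) →
    PySem.Dict String (List String) → PySem.Dict String (List String)
  | [], _, fns => fns
  | line :: rest, pending, fns =>
    if line = "}" then
      pyBgroup rest [] (pyBflush pending fns)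
    else
      let p := pending.map (fun nb => (nb.1, nb.2 ++ [line]))
      if PySem.Str.endswith line "{" then
        pyBgroup rest (p ++ [(((PySem.Str.split? line " ").getD []).headD "", [])]) fns
      else
        pyBgroup rest p fns

def group_lines_to_functions_alt (hlo_lines : List String) : List (String × List String) :=
  (pyBgroup hlo_lines [] PySem.Dict.empty).items

-- ===== PRECONDITION & SPEC =====
-- Pre_ excludes exactly the inputs where Python A raises ValueError: a line ending in '{'
-- with no later line equal to '}' (list.index('}') fails there).
def Pre_group_lines_to_functions (hlo_lines : List String) : Prop :=
  ∀ i, i < hlo_lines.length →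
    PySem.Str.endswith (hlo_lines.getD i "") "{" = true → "}" ∈ hlo_lines.drop (i + 1)

instance (hlo_lines : List String) : Decidable (Pre_group_lines_to_functions hlo_lines) := by
  unfold Pre_group_lines_to_functions; infer_instance

def pvWitness_group_lines_to_functions : List String := ["fn {", "a b", "}", "g x {", "c", "}"]

def Spec_group_lines_to_functions (hlo_lines : List String) (out : List (String × List String)) : Prop := out = group_lines_to_functions_alt hlo_lines
instance (hlo_lines : List String) (out : List (String × List String)) : Decidable (Spec_group_lines_to_functions hlo_lines out) := by unfold Spec_group_lines_to_functions; infer_instance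

-- ===== CLAIM (what is proved, stated in full; the proofs are below) =====
def Claim_equal_group_lines_to_functions : Prop := ∀ (hlo_lines : List String), Dom_group_lines_to_functions hlo_lines → Pre_group_lines_to_functions hlo_lines → Spec_group_lines_to_functions hlo_lines (group_lines_to_functions hlo_lines)

-- ===== LEMMAS AND PROOFS =====

-- if no '}' remains, A inserts nothing more
lemma pyAgroup_no_close (lines : List String) :
    ∀ fns, PySem.List.index? lines "}" = none → pyAgroup lines fns = fns := by
  induction lines with
  | nil => intro fns _; rfl
  | cons line rest ih =>
    intro fns h
    have hne : line ≠ "}" := by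
      intro he; subst he
      rw [PySem.List.index?_cons_self] at h
      simp at h
    rw [PySem.List.index?_cons_of_ne rest hne] at h
    have hrest : PySem.List.index? rest "}" = none := by
      cases hx : PySem.List.index? rest "}" with
      | none => rfl
      | some e => rw [hx] at h; simp at h
    by_cases hb : PySem.Str.endswith line "{" = true
    · simp only [pyAgroup, hb, if_true, hrest]
    · simp only [pyAgroup]
      rw [if_neg hb]
      exact ih fns hrest

-- the loop invariant: B with pending opens equals A run from the dict in which those
-- opens have already been inserted with their full bodies (completed by the next '}')
lemma pyBgroup_inv (lines : List String) :
    ∀ (pending : List (String × List String)) fns,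
      pyBgroup lines pending fns =
        (match PySem.List.index? lines "}" with
         | some e =>
             pyAgroup lines
               (pyBflush (pending.map (fun nb => (nb.1, nb.2 ++ lines.take e))) fns)
         | none => pyAgroup lines fns) := by
  induction lines with
  | nil => intro pending fns; rfl
  | cons line rest ih =>
    intro pending fns
    by_cases hc : line = "}"
    · subst hc
      rw [PySem.List.index?_cons_self]
      have hend : PySem.Str.endswith "}" "{" = false := by decide
      simp only [pyBgroup, pyAgroup, hend, Bool.false_eq_true, if_false,
        List.take_zero, List.append_nil]
      rw [ih [] (pyBflush pending fns)]
      cases hx : PySem.List.index? rest "}" with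
      | none => simp
      | some e => simp [pyBflush]
    · rw [PySem.List.index?_cons_of_ne rest hc]
      by_cases hb : PySem.Str.endswith line "{" = true
      · simp only [pyBgroup]
        rw [if_neg hc, if_pos hb, ih]
        cases hx : PySem.List.index? rest "}" with
        | none =>
          simp only [Option.map_none]
          rw [pyAgroup_no_close rest fns hx]
          simp only [pyAgroup, hb, if_true, hx]
        | some e =>
          simp only [Option.map_some, List.take_succ_cons]
          simp only [pyAgroup, hb, if_true, hx]
          have hsl : PySem.List.slice rest (some 0) (some (e : Int)) = rest.take e := by
            simpa using PySem.List.slice_natCast rest 0 e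
          rw [hsl]
          unfold pyBflush
          rw [List.map_append, List.foldl_append]
          simp only [List.map_map, Function.comp_def, List.map_cons, List.map_nil,
            List.foldl_cons, List.foldl_nil, List.append_assoc, List.singleton_append,
            List.nil_append]
      · simp only [pyBgroup]
        rw [if_neg hc, if_neg hb, ih]
        cases hx : PySem.List.index? rest "}" with
        | none =>
          simp only [Option.map_none]
          have : pyAgroup (line :: rest) fns = pyAgroup rest fns := by
            simp only [pyAgroup]; rw [if_neg hb]
          rw [this]
        | some e =>
          simp only [Option.map_some, List.take_succ_cons]
          have : ∀ d, pyAgroup (line :: rest) d = pyAgroup rest d := by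
            intro d; simp only [pyAgroup]; rw [if_neg hb]
          rw [this]
          simp only [List.map_map, Function.comp_def, List.append_assoc, List.singleton_append]

lemma group_eq (hlo_lines : List String) :
    group_lines_to_functions hlo_lines = group_lines_to_functions_alt hlo_lines := by
  unfold group_lines_to_functions group_lines_to_functions_alt
  rw [pyBgroup_inv hlo_lines [] PySem.Dict.empty]
  cases hx : PySem.List.index? hlo_lines "}" with
  | none => rfl
  | some e => simp only [pyBflush, List.map_nil, List.foldl_nil]

-- ===== VERDICT (by name: the statement is the Claim_ definition above) =====
theorem group_lines_to_functions_spec : Claim_equal_group_lines_to_functions := by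
  intro hlo_lines _ _
  exact group_eq hlo_lines
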